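-- pv_equiv track=rewrite | github.com/gaelic-ghost/socket | plugins/productivity-skills/skills/maintain-project-readme/scripts/maintain_project_readme.py | parse_title_and_summary
-- ===== SOURCE A (Python) =====
-- from typing import Dict, List, Optional, Sequence, Tuple
--
-- def parse_title_and_summary(preamble: str) -> Tuple[Optional[str], Optional[str], List[str]]:
--     lines = [line.rstrip() for line in preamble.splitlines()]
--     title: Optional[str] = None
--     summary: Optional[str] = None
--     extras: List[str] = []
--
--     if not lines:
--         return None, None, extras
--
--     title_index: Optional[int] = None
--     for idx, line in enumerate(lines):
--         if line.startswith("# "):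
--             title = line[2:].strip()
--             title_index = idx
--             break
--
--     if title_index is None:
--         return None, None, lines
--
--     summary_index: Optional[int] = None
--     for idx in range(title_index + 1, len(lines)):
--         if lines[idx].strip():
--             summary = lines[idx].strip()
--             summary_index = idx
--             break
--
--     for idx, line in enumerate(lines):
--         if idx == title_index or idx == summary_index:
--             continue
--         extras.append(line)
--
--     return title, summary, extras
-- ===== SOURCE B (Python) =====
-- def parse_title_and_summary(preamble):
--     return _scan_for_title([line.rstrip() for line in preamble.splitlines()])
--
--
-- def _scan_for_title(lines):
--     # Recursive descent: before a title is found every line is an extra.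
--     if not lines:
--         return None, None, []
--     head, rest = lines[0], lines[1:]
--     if head.startswith("# "):
--         summary, extras = _scan_for_summary(rest)
--         return head[2:].strip(), summary, extras
--     title, summary, extras = _scan_for_title(rest)
--     return title, summary, [head] + extras
--
--
-- def _scan_for_summary(lines):
--     # After the title: blank lines are extras until the first non-blank line,
--     # which becomes the summary; everything after it is an extra.
--     if not lines:
--         return None, []
--     head, rest = lines[0], lines[1:]
--     if head.strip():
--         return head.strip(), rest
--     summary, extras = _scan_for_summary(rest)
--     return summary, [head] + extras
-- ===== Notes on version B (the rewrite author's own statement) =====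
-- stated objective: simpler
-- what changed: Replaces A's four separate passes (empty check, index-tracking title scan, indexed summary scan over range, index-filtering extras rebuild) with one recursive descent that splits off the title line and then the summary line while collecting extras directly, with no indices at all.
import Mathlib
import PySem

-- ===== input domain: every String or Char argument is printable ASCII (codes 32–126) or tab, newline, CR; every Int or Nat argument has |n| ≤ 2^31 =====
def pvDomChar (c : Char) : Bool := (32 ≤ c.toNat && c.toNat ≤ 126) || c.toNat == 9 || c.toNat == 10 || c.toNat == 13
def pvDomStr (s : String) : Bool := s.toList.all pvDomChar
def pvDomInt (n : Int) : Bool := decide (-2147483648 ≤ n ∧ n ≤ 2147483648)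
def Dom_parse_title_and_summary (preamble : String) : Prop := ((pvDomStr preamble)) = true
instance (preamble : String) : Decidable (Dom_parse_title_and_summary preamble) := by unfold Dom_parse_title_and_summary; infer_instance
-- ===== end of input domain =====

-- B replaces A's four index-based passes by one index-free recursive descent; return values agree everywhere.

-- ===== PORT A =====
-- first loop: 'for idx, line in enumerate(lines): if line.startswith("# "): … break'
def aFindTitle : List String → Int → Option (Int × String)
  | [], _ => none
  | l :: rest, idx =>
    if PySem.Str.startswith l "# " then
      some (idx, PySem.Str.strip (PySem.Str.slice l (some 2) none))
    else aFindTitle rest (idx + 1)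

-- second loop: 'for idx in range(title_index + 1, len(lines)): if lines[idx].strip(): … break'
def aFindSummary (lines : List String) : List Int → Option (Int × String)
  | [] => none
  | idx :: rest =>
    match PySem.List.pyGet? lines idx with
    | none => none   -- unreachable: every idx from range(title_index+1, len(lines)) is in range
    | some l =>
      if PySem.Str.strip l ≠ "" then some (idx, PySem.Str.strip l)
      else aFindSummary lines rest

-- third loop: 'for idx, line in enumerate(lines): if idx == title_index or idx == summary_index: continue; extras.append(line)'
def aExtras : List String → Int → Int → Option Int → List String → List String
  | [], _, _, _, acc => acc
  | l :: rest, idx, ti, si, acc =>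
    if idx = ti ∨ si = some idx then aExtras rest (idx + 1) ti si acc
    else aExtras rest (idx + 1) ti si (acc ++ [l])

def parse_title_and_summary (preamble : String) : Option String × Option String × List String :=
  let lines := (PySem.Str.splitlines preamble).map PySem.Str.rstrip
  if lines = [] then (none, none, [])
  else
    match aFindTitle lines 0 with
    | none => (none, none, lines)
    | some (ti, t) =>
      let sRes := aFindSummary lines (PySem.List.pyRange (ti + 1) (lines.length : Int) 1)
      (some t, sRes.map Prod.snd, aExtras lines 0 ti (sRes.map Prod.fst) [])

-- ===== PORT B =====
-- port of _scan_for_summary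
def bScanSummary : List String → Option String × List String
  | [] => (none, [])
  | head :: rest =>
    if PySem.Str.strip head ≠ "" then (some (PySem.Str.strip head), rest)
    else
      let r := bScanSummary rest
      (r.1, head :: r.2)

-- port of _scan_for_title
def bScanTitle : List String → Option String × Option String × List String
  | [] => (none, none, [])
  | head :: rest =>
    if PySem.Str.startswith head "# " then
      let r := bScanSummary rest
      (some (PySem.Str.strip (PySem.Str.slice head (some 2) none)), r.1, r.2)
    else
      let r := bScanTitle rest
      (r.1, r.2.1, head :: r.2.2)

def parse_title_and_summary_alt (preamble : String) : Option String × Option String × List String :=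
  bScanTitle ((PySem.Str.splitlines preamble).map PySem.Str.rstrip)

-- ===== PRECONDITION & SPEC =====
def Spec_parse_title_and_summary (preamble : String) (out : Option String × Option String × List String) : Prop := out = parse_title_and_summary_alt preamble
instance (preamble : String) (out : Option String × Option String × List String) : Decidable (Spec_parse_title_and_summary preamble out) := by unfold Spec_parse_title_and_summary; infer_instance

-- ===== CLAIM (what is proved, stated in full; the proofs are below) =====
def Claim_equal_parse_title_and_summary : Prop := ∀ (preamble : String), Dom_parse_title_and_summary preamble → Spec_parse_title_and_summary preamble (parse_title_and_summary preamble)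

-- ===== LEMMAS AND PROOFS =====

-- split a list at the first line starting with "# "
def splitTitle : List String → Option (List String × String × List String)
  | [] => none
  | l :: rest =>
    if PySem.Str.startswith l "# " then some ([], l, rest)
    else (splitTitle rest).map (fun p => (l :: p.1, p.2.1, p.2.2))

-- split a list at the first line whose strip is non-empty
def splitBlank : List String → Option (List String × String × List String)
  | [] => none
  | l :: rest =>
    if PySem.Str.strip l ≠ "" then some ([], l, rest)
    else (splitBlank rest).map (fun p => (l :: p.1, p.2.1, p.2.2))

-- aExtras without the accumulator
def eFilter : List String → Int → Int → Option Int → List String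
  | [], _, _, _ => []
  | l :: rest, idx, ti, si =>
    if idx = ti ∨ si = some idx then eFilter rest (idx + 1) ti si
    else l :: eFilter rest (idx + 1) ti si

theorem splitTitle_eq (ls : List String) :
    ∀ pre l post, splitTitle ls = some (pre, l, post) →
      ls = pre ++ l :: post := by
  induction ls with
  | nil => simp [splitTitle]
  | cons a rest ih =>
    intro pre l post h
    simp only [splitTitle] at h
    by_cases ha : PySem.Str.startswith a "# " = true
    · rw [if_pos ha] at h
      simp at h
      obtain ⟨h1, h2, h3⟩ := h
      simp [← h1, ← h2, ← h3]
    · rw [if_neg ha] at h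
      simp only [Option.map_eq_some_iff, Prod.mk.injEq] at h
      obtain ⟨⟨p1, p2, p3⟩, hp, h1, h2, h3⟩ := h
      subst h1 h2 h3
      simp [ih p1 p2 p3 hp]

theorem splitBlank_eq (ls : List String) :
    ∀ pre l post, splitBlank ls = some (pre, l, post) →
      ls = pre ++ l :: post := by
  induction ls with
  | nil => simp [splitBlank]
  | cons a rest ih =>
    intro pre l post h
    simp only [splitBlank] at h
    by_cases ha : PySem.Str.strip a ≠ ""
    · rw [if_pos ha] at h
      simp at h
      obtain ⟨h1, h2, h3⟩ := h
      simp [← h1, ← h2, ← h3]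
    · rw [if_neg ha] at h
      simp only [Option.map_eq_some_iff, Prod.mk.injEq] at h
      obtain ⟨⟨p1, p2, p3⟩, hp, h1, h2, h3⟩ := h
      subst h1 h2 h3
      simp [ih p1 p2 p3 hp]

theorem aFindTitle_eq (ls : List String) : ∀ (k : Int),
    aFindTitle ls k = (splitTitle ls).map
      (fun p => (k + (p.1.length : Int), PySem.Str.strip (PySem.Str.slice p.2.1 (some 2) none))) := by
  induction ls with
  | nil => intro k; simp [aFindTitle, splitTitle]
  | cons a rest ih =>
    intro k
    simp only [aFindTitle, splitTitle]
    by_cases ha : PySem.Str.startswith a "# " = true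
    · rw [if_pos ha, if_pos ha]; simp
    · rw [if_neg ha, if_neg ha, ih (k + 1)]
      cases splitTitle rest with
      | none => simp
      | some p => simp; omega

theorem bScanTitle_none (ls : List String) : splitTitle ls = none →
    bScanTitle ls = (none, none, ls) := by
  induction ls with
  | nil => intro _; simp [bScanTitle]
  | cons a rest ih =>
    intro h
    simp only [splitTitle] at h
    simp only [bScanTitle]
    by_cases ha : PySem.Str.startswith a "# " = true
    · rw [if_pos ha] at h; simp at h
    · rw [if_neg ha] at h
      rw [if_neg ha]
      simp at h
      simp [ih h]

theorem bScanTitle_some (ls : List String) : ∀ pre l post,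
    splitTitle ls = some (pre, l, post) →
    bScanTitle ls = (some (PySem.Str.strip (PySem.Str.slice l (some 2) none)),
      (bScanSummary post).1, pre ++ (bScanSummary post).2) := by
  induction ls with
  | nil => simp [splitTitle]
  | cons a rest ih =>
    intro pre l post h
    simp only [splitTitle] at h
    simp only [bScanTitle]
    by_cases ha : PySem.Str.startswith a "# " = true
    · rw [if_pos ha] at h
      rw [if_pos ha]
      simp at h
      obtain ⟨h1, h2, h3⟩ := h
      subst h1 h2 h3
      simp
    · rw [if_neg ha] at h
      rw [if_neg ha]
      simp only [Option.map_eq_some_iff, Prod.mk.injEq] at h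
      obtain ⟨⟨p1, p2, p3⟩, hp, h1, h2, h3⟩ := h
      subst h1 h2 h3
      simp [ih p1 p2 p3 hp]

theorem bScanSummary_eq (post : List String) :
    bScanSummary post = (match splitBlank post with
      | none => (none, post)
      | some (b, l, rest) => (some (PySem.Str.strip l), b ++ rest)) := by
  induction post with
  | nil => simp [bScanSummary, splitBlank]
  | cons a rest ih =>
    simp only [bScanSummary, splitBlank]
    by_cases ha : PySem.Str.strip a ≠ ""
    · rw [if_pos ha, if_pos ha]; simp
    · rw [if_neg ha, if_neg ha, ih]
      cases hsb : splitBlank rest with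
      | none => simp
      | some p => obtain ⟨b, l, r⟩ := p; simp

theorem aFindSummary_eq (post : List String) : ∀ q : List String,
    aFindSummary (q ++ post) (PySem.List.pyRange (q.length : Int) (((q ++ post).length : Int)) 1)
      = (splitBlank post).map (fun p => ((q.length : Int) + (p.1.length : Int), PySem.Str.strip p.2.1)) := by
  induction post with
  | nil =>
    intro q
    have : PySem.List.pyRange (q.length : Int) ((q ++ []).length : Int) 1 = [] := by
      simp
    rw [this]
    simp [aFindSummary, splitBlank]
  | cons a rest ih =>
    intro q
    have hlt : (q.length : Int) < ((q ++ a :: rest).length : Int) := by simp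
    rw [PySem.List.pyRange_one_cons hlt]
    simp only [aFindSummary, PySem.List.pyGet?_append_length]
    by_cases ha : PySem.Str.strip a ≠ ""
    · rw [if_pos ha]
      simp only [splitBlank]
      rw [if_pos ha]
      simp
    · rw [if_neg ha]
      simp only [splitBlank]
      rw [if_neg ha]
      have hq : q ++ a :: rest = (q ++ [a]) ++ rest := by simp
      have hl : (q.length : Int) + 1 = ((q ++ [a]).length : Int) := by simp
      rw [hq, hl, ih (q ++ [a])]
      cases splitBlank rest with
      | none => simp
      | some p => simp; omega

theorem aExtras_acc (ls : List String) : ∀ (idx ti : Int) (si : Option Int) (acc : List String),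
    aExtras ls idx ti si acc = acc ++ eFilter ls idx ti si := by
  induction ls with
  | nil => intro idx ti si acc; simp [aExtras, eFilter]
  | cons a rest ih =>
    intro idx ti si acc
    simp only [aExtras, eFilter]
    by_cases hc : idx = ti ∨ si = some idx
    · rw [if_pos hc, if_pos hc, ih]
    · rw [if_neg hc, if_neg hc, ih]; simp

theorem eFilter_append (xs ys : List String) : ∀ (k ti : Int) (si : Option Int),
    eFilter (xs ++ ys) k ti si = eFilter xs k ti si ++ eFilter ys (k + (xs.length : Int)) ti si := by
  induction xs with
  | nil => intro k ti si; simp [eFilter]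
  | cons a rest ih =>
    intro k ti si
    simp only [List.cons_append, eFilter]
    by_cases hc : k = ti ∨ si = some k
    · rw [if_pos hc, if_pos hc, ih]
      congr 2
      simp; omega
    · rw [if_neg hc, if_neg hc, ih,
        show k + 1 + (rest.length : Int) = k + ((a :: rest).length : Int) by simp only [List.length_cons]; push_cast; ring]
      simp

theorem eFilter_id (xs : List String) : ∀ (k ti : Int) (si : Option Int),
    (ti < k ∨ k + (xs.length : Int) ≤ ti) →
    (∀ m, si = some m → m < k ∨ k + (xs.length : Int) ≤ m) →
    eFilter xs k ti si = xs := by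
  induction xs with
  | nil => intro k ti si _ _; simp [eFilter]
  | cons a rest ih =>
    intro k ti si hti hsi
    simp only [eFilter]
    have hc : ¬ (k = ti ∨ si = some k) := by
      rintro (h | h)
      · subst h; simp at hti; omega
      · have h' := hsi k h
        simp only [List.length_cons] at h'; push_cast at h'; omega
    have h1 : ti < k + 1 ∨ (k + 1) + (rest.length : Int) ≤ ti := by
      simp only [List.length_cons] at hti; push_cast at hti ⊢; omega
    have h2 : ∀ m, si = some m → m < k + 1 ∨ (k + 1) + (rest.length : Int) ≤ m := by
      intro m hm
      have hmk : m ≠ k := fun h => hc (Or.inr (h ▸ hm))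
      have := hsi m hm
      simp only [List.length_cons] at this; push_cast at this ⊢; omega
    rw [if_neg hc, ih (k + 1) ti si h1 h2]

theorem core (ls : List String) :
    (if ls = [] then ((none, none, []) : Option String × Option String × List String)
     else match aFindTitle ls 0 with
     | none => (none, none, ls)
     | some (ti, t) =>
       let sRes := aFindSummary ls (PySem.List.pyRange (ti + 1) (ls.length : Int) 1)
       (some t, sRes.map Prod.snd, aExtras ls 0 ti (sRes.map Prod.fst) []))
    = bScanTitle ls := by
  by_cases hnil : ls = []
  · subst hnil; simp [bScanTitle]
  · rw [if_neg hnil, aFindTitle_eq ls 0]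
    cases hsp : splitTitle ls with
    | none => simp [bScanTitle_none ls hsp]
    | some p =>
      obtain ⟨pre, l, post⟩ := p
      have hls : ls = pre ++ l :: post := splitTitle_eq ls pre l post hsp
      rw [bScanTitle_some ls pre l post hsp, bScanSummary_eq post]
      simp only [Option.map_some]
      have hti : (0 : Int) + (pre.length : Int) = (pre.length : Int) := by ring
      rw [hti]
      have hq : ls = (pre ++ [l]) ++ post := by simp [hls]
      have hstart : (pre.length : Int) + 1 = ((pre ++ [l]).length : Int) := by simp
      have hsum : aFindSummary ls (PySem.List.pyRange ((pre.length : Int) + 1) (ls.length : Int) 1)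
          = (splitBlank post).map
              (fun p => (((pre ++ [l]).length : Int) + (p.1.length : Int), PySem.Str.strip p.2.1)) := by
        rw [hstart, hq]
        exact aFindSummary_eq post (pre ++ [l])
      simp only [hsum]
      cases hsb : splitBlank post with
      | none =>
        simp only [Option.map_none]
        rw [aExtras_acc, List.nil_append, hls, eFilter_append]
        have h1 : eFilter pre 0 (pre.length : Int) none = pre := by
          apply eFilter_id
          · right; simp
          · simp
        have h2 : eFilter (l :: post) (0 + (pre.length : Int)) (pre.length : Int) none = post := by
          simp only [zero_add, eFilter, true_or, if_true]
          apply eFilter_id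
          · left; omega
          · simp
        rw [h1, h2]
      | some pb =>
        obtain ⟨b, lS, rest⟩ := pb
        have hpost : post = b ++ lS :: rest := splitBlank_eq post b lS rest hsb
        have hlen : ((pre ++ [l]).length : Int) = (pre.length : Int) + 1 := by simp
        simp only [Option.map_some, hlen]
        rw [aExtras_acc, List.nil_append, hls, hpost, eFilter_append]
        have h1 : eFilter pre 0 (pre.length : Int)
            (some ((pre.length : Int) + 1 + (b.length : Int))) = pre := by
          apply eFilter_id
          · right; simp
          · intro m hm; right; simp only [Option.some.injEq] at hm; omega
        have h2 : eFilter (l :: (b ++ lS :: rest)) (0 + (pre.length : Int)) (pre.length : Int)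
            (some ((pre.length : Int) + 1 + (b.length : Int))) = b ++ rest := by
          simp only [zero_add, eFilter, true_or, if_true]
          rw [eFilter_append]
          have hb : eFilter b ((pre.length : Int) + 1) (pre.length : Int)
              (some ((pre.length : Int) + 1 + (b.length : Int))) = b := by
            apply eFilter_id
            · left; omega
            · intro m hm; right; simp only [Option.some.injEq] at hm; omega
          have hrest : eFilter (lS :: rest) ((pre.length : Int) + 1 + (b.length : Int)) (pre.length : Int)
              (some ((pre.length : Int) + 1 + (b.length : Int))) = rest := by
            simp only [eFilter, or_true, if_true]
            apply eFilter_id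
            · left; omega
            · intro m hm; left; simp only [Option.some.injEq] at hm; omega
          rw [hb, hrest]
        rw [h1, h2]

-- ===== VERDICT (by name: the statement is the Claim_ definition above) =====
theorem parse_title_and_summary_spec : Claim_equal_parse_title_and_summary := by
  intro preamble _
  unfold Spec_parse_title_and_summary parse_title_and_summary parse_title_and_summary_alt
  exact core _
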